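-- pv_equiv track=rewrite | github.com/quocchungthan/bypassed-fb-python | html_tool.py | _cleanup_text
-- ===== SOURCE A (Python) =====
-- def _cleanup_text(text: str) -> str:
--     """Clean text: merge 1-char lines, remove duplicates."""
--     lines = [line.strip() for line in text.splitlines() if line.strip()]
--
--     # merge single-character lines with the previous one
--     merged_lines = []
--     for line in lines:
--         if len(line) == 1 and merged_lines:
--             merged_lines[-1] += line  # append without space
--         else:
--             merged_lines.append(line)
--
--     # remove duplicate lines (case-insensitive)
--     seen = set()
--     unique_lines = []
--     for line in merged_lines:
--         normalized = line.lower()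
--         if normalized not in seen:
--             seen.add(normalized)
--             unique_lines.append(line)
--
--     return "\n".join(unique_lines)
-- ===== SOURCE B (Python) =====
-- def _cleanup_text(text: str) -> str:
--     """Clean text: merge 1-char lines, remove duplicates (single pass)."""
--     result = {}          # lowercase line -> first line with that spelling, in order
--     pending = None       # line currently being extended with 1-char lines
--     for raw in text.splitlines():
--         line = raw.strip()
--         if not line:
--             continue
--         if len(line) == 1 and pending is not None:
--             pending += line
--         else:
--             if pending is not None:
--                 result.setdefault(pending.lower(), pending)
--             pending = line
--     if pending is not None:
--         result.setdefault(pending.lower(), pending)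
--     return "\n".join(result.values())
-- ===== Notes on version B (the rewrite author's own statement) =====
-- stated objective: alternative
-- what changed: A's three sequential passes (strip/filter list, merge loop over a list, dedup loop with a seen-set plus output list) are fused into one pass over the raw lines that keeps a pending buffer and a single insertion-ordered dict keyed by the lowercased line via setdefault, whose values are joined at the end.
import Mathlib
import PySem

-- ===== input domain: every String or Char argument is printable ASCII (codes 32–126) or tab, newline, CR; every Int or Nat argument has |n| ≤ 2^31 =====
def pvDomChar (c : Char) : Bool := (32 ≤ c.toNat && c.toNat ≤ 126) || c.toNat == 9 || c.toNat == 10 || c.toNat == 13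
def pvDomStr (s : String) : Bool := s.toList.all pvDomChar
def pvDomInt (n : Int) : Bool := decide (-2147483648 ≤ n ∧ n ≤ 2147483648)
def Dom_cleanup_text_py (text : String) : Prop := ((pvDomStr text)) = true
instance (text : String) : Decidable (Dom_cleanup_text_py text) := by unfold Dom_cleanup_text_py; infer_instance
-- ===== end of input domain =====

-- B fuses A's three passes (strip/filter, merge loop, dedup loop) into a single pass over the
-- raw lines keeping a `pending` buffer and one insertion-ordered dict keyed by the lowercased line.

-- ===== PORT A =====
-- merge step: `if len(line) == 1 and merged_lines: merged_lines[-1] += line else: append`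
def pvStepMerge (acc : List String) (line : String) : List String :=
  if PySem.Str.len line == 1 && !acc.isEmpty then
    acc.dropLast ++ [(acc.getLast?.getD "") ++ line]   -- getD "" never used: acc nonempty here
  else acc ++ [line]

-- dedup step over (seen, unique_lines)
def pvStepDedup (st : PySem.Set String × List String) (line : String) :
    PySem.Set String × List String :=
  let normalized := PySem.Str.lower line
  if !(PySem.Set.contains st.1 normalized) then
    (PySem.Set.add st.1 normalized, st.2 ++ [line])
  else st

def cleanup_text_py (text : String) : String :=
  let lines := ((PySem.Str.splitlines text).map PySem.Str.strip).filter (fun l => !(l == ""))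
  let merged_lines := lines.foldl pvStepMerge []
  let st := merged_lines.foldl pvStepDedup (PySem.Set.empty, [])
  PySem.Str.join "\n" st.2

-- ===== PORT B =====
-- flush of `pending` into the dict: `result.setdefault(pending.lower(), pending)`
def pvFlush (d : PySem.Dict String String) (p : Option String) : PySem.Dict String String :=
  match p with
  | none => d
  | some x => d.setdefault (PySem.Str.lower x) x

-- one fused loop body over a raw (unstripped) line
def pvStepB (st : PySem.Dict String String × Option String) (raw : String) :
    PySem.Dict String String × Option String :=
  let line := PySem.Str.strip raw
  if line == "" then st
  else if PySem.Str.len line == 1 && st.2.isSome then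
    (st.1, some ((st.2.getD "") ++ line))              -- getD "" never used: st.2 isSome here
  else (pvFlush st.1 st.2, some line)

def cleanup_text_py_alt (text : String) : String :=
  let st := (PySem.Str.splitlines text).foldl pvStepB (PySem.Dict.empty, none)
  PySem.Str.join "\n" (PySem.Dict.values (pvFlush st.1 st.2))

-- ===== PRECONDITION & SPEC =====
def Spec_cleanup_text_py (text : String) (out : String) : Prop := out = cleanup_text_py_alt text
instance (text : String) (out : String) : Decidable (Spec_cleanup_text_py text out) := by unfold Spec_cleanup_text_py; infer_instance

-- ===== CLAIM (what is proved, stated in full; the proofs are below) =====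
def Claim_equal_cleanup_text_py : Prop := ∀ (text : String), Dom_cleanup_text_py text → Spec_cleanup_text_py text (cleanup_text_py text)

-- ===== LEMMAS AND PROOFS =====

theorem pvStepMerge_pos (acc : List String) (line : String)
    (h : (PySem.Str.len line == 1 && !acc.isEmpty) = true) :
    pvStepMerge acc line = acc.dropLast ++ [(acc.getLast?.getD "") ++ line] := by
  rw [pvStepMerge, if_pos h]

theorem pvStepMerge_neg (acc : List String) (line : String)
    (h : (PySem.Str.len line == 1 && !acc.isEmpty) = false) :
    pvStepMerge acc line = acc ++ [line] := by
  rw [pvStepMerge, if_neg (by rw [h]; exact Bool.false_ne_true)]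

-- B's skip-empty fold over raw lines = fold over the stripped nonempty lines
theorem foldl_pvStepB_eq (raws : List String) (st : PySem.Dict String String × Option String) :
    raws.foldl pvStepB st
      = ((raws.map PySem.Str.strip).filter (fun l => !(l == ""))).foldl
          (fun st line =>
            if PySem.Str.len line == 1 && st.2.isSome then
              (st.1, some ((st.2.getD "") ++ line))
            else (pvFlush st.1 st.2, some line)) st := by
  induction raws generalizing st with
  | nil => rfl
  | cons r rs ih =>
    simp only [List.foldl_cons, List.map_cons, List.filter_cons]
    cases hb : (PySem.Str.strip r == "") with
    | true =>
      have hstep : pvStepB st r = st := by rw [pvStepB]; simp only [hb, if_true]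
      rw [hstep]
      simp only [Bool.not_true, Bool.false_eq_true, if_false]
      exact ih st
    | false =>
      have hstep : pvStepB st r
          = (if PySem.Str.len (PySem.Str.strip r) == 1 && st.2.isSome then
              (st.1, some ((st.2.getD "") ++ PySem.Str.strip r))
            else (pvFlush st.1 st.2, some (PySem.Str.strip r))) := by
        rw [pvStepB]; simp only [hb, Bool.false_eq_true, if_false]
      rw [hstep]
      simp only [Bool.not_false, if_true, List.foldl_cons]
      exact ih _

-- A's merge fold only touches the last element: a prefix passes through
theorem foldl_pvStepMerge_append (rest : List String) :
    ∀ (pre acc : List String), acc ≠ [] →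
      rest.foldl pvStepMerge (pre ++ acc) = pre ++ rest.foldl pvStepMerge acc := by
  induction rest with
  | nil => intros; rfl
  | cons l ls ih =>
    intro pre acc hacc
    obtain ⟨as, a, rfl⟩ := (List.eq_nil_or_concat acc).resolve_left hacc
    simp only [List.foldl_cons]
    by_cases h1 : (PySem.Str.len l == 1) = true
    · rw [pvStepMerge_pos _ _ (by rw [h1, Bool.true_and]; simp),
        pvStepMerge_pos _ _ (by rw [h1, Bool.true_and]; simp)]
      have e1 : (pre ++ as.concat a).dropLast
            ++ [((pre ++ as.concat a).getLast?.getD "") ++ l] = pre ++ (as ++ [a ++ l]) := by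
        simp
      have e2 : (as.concat a).dropLast
            ++ [((as.concat a).getLast?.getD "") ++ l] = as ++ [a ++ l] := by
        simp
      rw [e1, e2, ih _ _ (by simp)]
    · have h1' : (PySem.Str.len l == 1) = false := by simpa using h1
      rw [pvStepMerge_neg _ _ (by rw [h1', Bool.false_and]),
        pvStepMerge_neg _ _ (by rw [h1', Bool.false_and])]
      rw [List.append_assoc]
      exact ih _ _ (by simp)

-- the dict-setdefault step, as a function of merged lines
def pvDStep (d : PySem.Dict String String) (line : String) : PySem.Dict String String :=
  d.setdefault (PySem.Str.lower line) line

-- Set.contains on a dict's key list agrees with Dict.contains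
theorem pv_contains_map_fst (ps : List (String × String)) (k : String) :
    PySem.Set.contains (ps.map Prod.fst) k = ps.any (fun p => p.1 == k) := by
  induction ps with
  | nil => rfl
  | cons p ps ih =>
    simp only [List.map_cons, PySem.Set.contains, List.contains_cons, List.any_cons]
    rw [← ih]
    simp only [PySem.Set.contains]
    by_cases hkp : k = p.1
    · subst hkp; simp
    · have h1 : (k == p.1) = false := by simp [hkp]
      have h2 : (p.1 == k) = false := by simp [Ne.symm hkp]
      rw [h1, h2]

-- A's set+list dedup fold tracks exactly the keys/values of the setdefault fold
theorem dedup_eq_dict (merged : List String) :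
    ∀ (d : PySem.Dict String String),
      merged.foldl pvStepDedup (d.keys, d.values)
        = ((merged.foldl pvDStep d).keys, (merged.foldl pvDStep d).values) := by
  induction merged with
  | nil => intro d; rfl
  | cons l ls ih =>
    intro d
    simp only [List.foldl_cons]
    have hc : PySem.Set.contains (PySem.Dict.keys d) (PySem.Str.lower l)
        = d.contains (PySem.Str.lower l) :=
      pv_contains_map_fst d.items (PySem.Str.lower l)
    by_cases h : d.contains (PySem.Str.lower l) = true
    · have hst : pvStepDedup (d.keys, d.values) l = (d.keys, d.values) := by
        simp only [pvStepDedup]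
        rw [hc, h]
        rfl
      rw [hst, pvDStep, PySem.Dict.setdefault, if_pos h, ih]
    · have hf : d.contains (PySem.Str.lower l) = false := by simpa using h
      have hadd : PySem.Set.add d.keys (PySem.Str.lower l) = d.keys ++ [PySem.Str.lower l] := by
        rw [PySem.Set.add, if_neg (by rw [hc, hf]; exact Bool.false_ne_true)]
      have hst : pvStepDedup (d.keys, d.values) l
          = (d.keys ++ [PySem.Str.lower l], d.values ++ [l]) := by
        simp only [pvStepDedup]
        rw [hc, hf, hadd]
        rfl
      have hkeys : (PySem.Dict.mk (d.items ++ [(PySem.Str.lower l, l)])).keys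
          = d.keys ++ [PySem.Str.lower l] := by simp [PySem.Dict.keys]
      have hvals : (PySem.Dict.mk (d.items ++ [(PySem.Str.lower l, l)])).values
          = d.values ++ [l] := by simp [PySem.Dict.values]
      rw [hst, ← hkeys, ← hvals, ih, pvDStep, PySem.Dict.setdefault, if_neg h]

-- main invariant: B's fused state vs A's merged-then-dict pipeline
theorem fused_invariant (lines : List String) :
    ∀ (d : PySem.Dict String String) (p : Option String),
      (pvFlush (lines.foldl
          (fun st line =>
            if PySem.Str.len line == 1 && st.2.isSome then
              (st.1, some ((st.2.getD "") ++ line))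
            else (pvFlush st.1 st.2, some line)) (d, p)).1
        (lines.foldl
          (fun st line =>
            if PySem.Str.len line == 1 && st.2.isSome then
              (st.1, some ((st.2.getD "") ++ line))
            else (pvFlush st.1 st.2, some line)) (d, p)).2)
      = (lines.foldl pvStepMerge (p.elim [] (fun x => [x]))).foldl pvDStep d := by
  induction lines with
  | nil =>
    intro d p
    cases p with
    | none => rfl
    | some x => simp [pvFlush, pvDStep, List.foldl]
  | cons l ls ih =>
    intro d p
    simp only [List.foldl_cons]
    by_cases hcond : (PySem.Str.len l == 1 && p.isSome) = true
    · obtain ⟨h1, hp⟩ := Bool.and_eq_true_iff.mp hcond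
      obtain ⟨x, rfl⟩ := Option.isSome_iff_exists.mp hp
      simp only [hcond, if_true]
      rw [ih]
      congr 1
      rw [pvStepMerge_pos _ _ (by rw [h1, Bool.true_and]; rfl)]
      simp [Option.elim]
    · have hcond' : (PySem.Str.len l == 1 && p.isSome) = false := by simpa using hcond
      simp only [hcond', Bool.false_eq_true, if_false]
      rw [ih]
      have hmerge : pvStepMerge (p.elim [] (fun x => [x])) l
          = p.elim [] (fun x => [x]) ++ [l] := by
        cases p with
        | none => rw [pvStepMerge_neg _ _ (by simp)]
        | some x =>
          have h1 : (PySem.Str.len l == 1) = false := by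
            cases hb : (PySem.Str.len l == 1) with
            | false => rfl
            | true => rw [hb] at hcond'; simp at hcond'
          rw [pvStepMerge_neg _ _ (by rw [h1, Bool.false_and])]
      rw [hmerge, foldl_pvStepMerge_append ls (p.elim [] (fun x => [x])) [l] (by simp),
        List.foldl_append]
      cases p with
      | none => rfl
      | some x => simp [pvFlush, pvDStep, List.foldl]

-- ===== VERDICT (by name: the statement is the Claim_ definition above) =====
theorem cleanup_text_py_spec : Claim_equal_cleanup_text_py := by
  intro text _
  unfold Spec_cleanup_text_py
  simp only [cleanup_text_py, cleanup_text_py_alt]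
  rw [foldl_pvStepB_eq]
  have hmain := fused_invariant (((PySem.Str.splitlines text).map PySem.Str.strip).filter
    (fun l => !(l == ""))) PySem.Dict.empty none
  simp only [Option.elim] at hmain
  rw [hmain]
  have hd := dedup_eq_dict ((((PySem.Str.splitlines text).map PySem.Str.strip).filter
    (fun l => !(l == ""))).foldl pvStepMerge []) PySem.Dict.empty
  have hinit : (PySem.Dict.empty : PySem.Dict String String).keys = PySem.Set.empty := rfl
  have hinit2 : (PySem.Dict.empty : PySem.Dict String String).values = ([] : List String) := rfl
  rw [hinit, hinit2] at hd
  rw [hd]
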